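-- pv_equiv track=rewrite | github.com/SchriderLab/Timesweeper | src/sim_haplotypes.py | make_haps
-- ===== SOURCE A (Python) =====
-- def make_haps(polyMuts, sampled_genomes):
--     """
--     Creates genotype 0/1 strings for each haplotype in ms-style format.
--
--     Args:
--         polyMuts (list[tuple]): Polymorphic mutations with ID, location, and permID fields.
--
--     Returns:
--         list[str]: All haplotype genotype strings for a given sample.
--     """
--     haps = []
--
--     for i in range(len(sampled_genomes)):
--         haps.append(["0"] * len(polyMuts))
--
--     for i in range(len(sampled_genomes)):
--         for locI, loc, contLoc, mutId in polyMuts: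
--             if mutId in sampled_genomes[i]:
--                 haps[i][locI] = "1"
--
--     return haps
-- ===== SOURCE B (Python) =====
-- def make_haps(polyMuts, sampled_genomes):
--     # Inverted traversal: index mutId -> list of column positions once,
--     # then walk each genome's own members instead of scanning all polyMuts per genome.
--     index = {}
--     for locI, loc, contLoc, mutId in polyMuts:
--         index.setdefault(mutId, []).append(locI)
--     n = len(polyMuts)
--     haps = []
--     for genome in sampled_genomes:
--         row = ["0"] * n
--         for m in genome:
--             for locI in index.get(m, []):
--                 row[locI] = "1"
--         haps.append(row)
--     return haps
-- ===== Notes on version B (the rewrite author's own statement) =====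
-- stated objective: faster
-- what changed: B builds a mutId->positions index dict once and walks each genome's own members with O(1) lookups, instead of A's per-genome rescan of all polyMuts with an 'in genome' list scan per mutation.
import Mathlib
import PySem

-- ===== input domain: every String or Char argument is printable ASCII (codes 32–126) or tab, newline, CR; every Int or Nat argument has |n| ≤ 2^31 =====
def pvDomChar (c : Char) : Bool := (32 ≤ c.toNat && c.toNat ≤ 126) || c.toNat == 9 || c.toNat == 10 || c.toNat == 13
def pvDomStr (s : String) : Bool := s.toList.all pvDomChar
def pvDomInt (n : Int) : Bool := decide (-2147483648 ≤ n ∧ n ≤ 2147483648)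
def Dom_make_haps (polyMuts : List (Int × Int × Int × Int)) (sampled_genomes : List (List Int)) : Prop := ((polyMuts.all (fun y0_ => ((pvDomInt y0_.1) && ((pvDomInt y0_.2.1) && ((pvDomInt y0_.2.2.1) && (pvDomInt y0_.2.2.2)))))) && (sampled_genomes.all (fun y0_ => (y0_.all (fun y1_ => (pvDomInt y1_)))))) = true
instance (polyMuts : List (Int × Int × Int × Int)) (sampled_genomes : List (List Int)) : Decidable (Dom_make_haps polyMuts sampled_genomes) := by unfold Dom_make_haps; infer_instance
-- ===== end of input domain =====

-- B builds a mutId→positions index once and marks only the positions of mutations each genome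
-- actually contains, instead of A's per-genome rescan of all polyMuts (objective: faster).

-- ===== PORT A =====
-- literal transliteration of A: build rows by appending, then mutate haps[i][locI] = "1"
def make_haps (polyMuts : List (Int × Int × Int × Int)) (sampled_genomes : List (List Int)) : List (List String) :=
  let haps := (List.range sampled_genomes.length).foldl
    (fun h _ => h ++ [List.replicate polyMuts.length "0"]) []
  (List.range sampled_genomes.length).foldl
    (fun h i =>
      polyMuts.foldl
        (fun h t =>
          if t.2.2.2 ∈ sampled_genomes.getD i [] then
            h.set i (PySem.List.pySetD (h.getD i []) t.1 "1")
          else h)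
        h)
    haps

-- ===== PORT B =====
-- literal transliteration of Source B: index.setdefault(mutId, []).append(locI) is Dict.modify _ [] (· ++ [locI])
def make_haps_alt (polyMuts : List (Int × Int × Int × Int)) (sampled_genomes : List (List Int)) : List (List String) :=
  let index : PySem.Dict Int (List Int) :=
    polyMuts.foldl (fun d t => d.modify t.2.2.2 [] (fun v => v ++ [t.1])) PySem.Dict.empty
  sampled_genomes.map (fun g =>
    g.foldl
      (fun row m => (index.getD m []).foldl (fun row locI => PySem.List.pySetD row locI "1") row)
      (List.replicate polyMuts.length "0"))

-- ===== PRECONDITION & SPEC =====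
-- Pre_ excludes exactly the inputs where Python A raises IndexError: a mutation whose mutId
-- occurs in some sampled genome but whose locI is outside [-len(polyMuts), len(polyMuts)).
def Pre_make_haps (polyMuts : List (Int × Int × Int × Int)) (sampled_genomes : List (List Int)) : Prop :=
  ∀ t ∈ polyMuts, (∃ g ∈ sampled_genomes, t.2.2.2 ∈ g) →
    (-(polyMuts.length : Int) ≤ t.1 ∧ t.1 < polyMuts.length)
instance (polyMuts : List (Int × Int × Int × Int)) (sampled_genomes : List (List Int)) : Decidable (Pre_make_haps polyMuts sampled_genomes) := by unfold Pre_make_haps; infer_instance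
def pvWitness_make_haps : (List (Int × Int × Int × Int)) × List (List Int) :=
  ([(0, 10, 10, 5), (1, 20, 20, 7)], [[5], [7, 5], []])
def Spec_make_haps (polyMuts : List (Int × Int × Int × Int)) (sampled_genomes : List (List Int)) (out : List (List String)) : Prop := out = make_haps_alt polyMuts sampled_genomes
instance (polyMuts : List (Int × Int × Int × Int)) (sampled_genomes : List (List Int)) (out : List (List String)) : Decidable (Spec_make_haps polyMuts sampled_genomes out) := by unfold Spec_make_haps; infer_instance

-- ===== CLAIM (what is proved, stated in full; the proofs are below) =====
def Claim_equal_make_haps : Prop := ∀ (polyMuts : List (Int × Int × Int × Int)) (sampled_genomes : List (List Int)), Dom_make_haps polyMuts sampled_genomes → Pre_make_haps polyMuts sampled_genomes → Spec_make_haps polyMuts sampled_genomes (make_haps polyMuts sampled_genomes)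

-- ===== LEMMAS AND PROOFS =====

-- does Python's xs[i] = "1" (as the total pySetD) hit column j?
def pvHit (n : Nat) (i : Int) (j : Nat) : Bool := PySem.List.pyIdx? n i == some j

theorem pvIdx_lt {n : Nat} {i : Int} {k : Nat} (h : PySem.List.pyIdx? n i = some k) : k < n := by
  unfold PySem.List.pyIdx? at h
  split_ifs at h <;> simp_all <;> omega

theorem pvSet_getElem? (r : List String) (i : Int) (j : Nat) :
    (PySem.List.pySetD r i "1")[j]? = if pvHit r.length i j then some "1" else r[j]? := by
  unfold PySem.List.pySetD PySem.List.pySet? pvHit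
  cases h : PySem.List.pyIdx? r.length i with
  | none => simp
  | some k =>
    have hk := pvIdx_lt h
    by_cases hj : k = j
    · subst hj; simp [hk]
    · simp [hj]

-- marking a list of columns, characterised per position
theorem pvMarkFold_getElem? (idxs : List Int) : ∀ (r : List String) (j : Nat),
    (idxs.foldl (fun row locI => PySem.List.pySetD row locI "1") r)[j]? =
      if idxs.any (fun i => pvHit r.length i j) then some "1" else r[j]? := by
  induction idxs with
  | nil => intro r j; simp
  | cons i rest ih =>
    intro r j
    simp only [List.foldl_cons, List.any_cons]
    rw [ih, PySem.List.length_pySetD, pvSet_getElem?]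
    by_cases hc : pvHit r.length i j = true <;>
      by_cases ha : rest.any (fun i => pvHit r.length i j) = true <;> simp [hc, ha]

theorem pvMarkFold_length (idxs : List Int) : ∀ (r : List String),
    (idxs.foldl (fun row locI => PySem.List.pySetD row locI "1") r).length = r.length := by
  induction idxs with
  | nil => intro r; rfl
  | cons i rest ih => intro r; simp only [List.foldl_cons]; rw [ih, PySem.List.length_pySetD]

-- B's per-row loop, characterised per position
theorem pvRowB_getElem? (index : PySem.Dict Int (List Int)) (g : List Int) : ∀ (r : List String) (j : Nat),
    (g.foldl (fun row m => (index.getD m []).foldl (fun row locI => PySem.List.pySetD row locI "1") row) r)[j]? =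
      if g.any (fun m => (index.getD m []).any (fun i => pvHit r.length i j)) then some "1" else r[j]? := by
  induction g with
  | nil => intro r j; simp
  | cons m rest ih =>
    intro r j
    simp only [List.foldl_cons, List.any_cons]
    rw [ih, pvMarkFold_length, pvMarkFold_getElem?]
    by_cases hc : (index.getD m []).any (fun i => pvHit r.length i j) = true <;>
      by_cases ha : rest.any (fun m => (index.getD m []).any (fun i => pvHit r.length i j)) = true <;>
      simp [hc, ha]

-- A's per-row loop (the inner polyMuts scan acting on one row), characterised per position
theorem pvRowA_getElem? (g : List Int) (ps : List (Int × Int × Int × Int)) : ∀ (r : List String) (j : Nat),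
    (ps.foldl (fun row t => if t.2.2.2 ∈ g then PySem.List.pySetD row t.1 "1" else row) r)[j]? =
      if ps.any (fun t => decide (t.2.2.2 ∈ g) && pvHit r.length t.1 j) then some "1" else r[j]? := by
  induction ps with
  | nil => intro r j; simp
  | cons t rest ih =>
    intro r j
    simp only [List.foldl_cons, List.any_cons]
    by_cases hm : t.2.2.2 ∈ g
    · rw [if_pos hm, ih, PySem.List.length_pySetD, pvSet_getElem?]
      by_cases hc : pvHit r.length t.1 j = true <;>
        by_cases ha : rest.any (fun t => decide (t.2.2.2 ∈ g) && pvHit r.length t.1 j) = true <;>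
        simp [hc, ha, hm]
    · rw [if_neg hm, ih]
      simp only [decide_eq_false hm, Bool.false_and, Bool.false_or]

-- A's inner loop over polyMuts at genome index i equals: replace row i by the per-row loop's result
theorem pvInnerA (g : List Int) (ps : List (Int × Int × Int × Int)) : ∀ (h : List (List String)) (i : Nat), i < h.length →
    (ps.foldl (fun h t => if t.2.2.2 ∈ g then h.set i (PySem.List.pySetD (h.getD i []) t.1 "1") else h) h) =
      h.set i (ps.foldl (fun row t => if t.2.2.2 ∈ g then PySem.List.pySetD row t.1 "1" else row) (h.getD i [])) := by
  induction ps with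
  | nil =>
    intro h i hi
    have : h.getD i [] = h[i] := by
      simp [List.getD_eq_getElem?_getD, List.getElem?_eq_getElem hi]
    rw [List.foldl_nil, List.foldl_nil, this, List.set_getElem_self]
  | cons t rest ih =>
    intro h i hi
    simp only [List.foldl_cons]
    by_cases hm : t.2.2.2 ∈ g
    · rw [if_pos hm, if_pos hm]
      have hlen : i < (h.set i (PySem.List.pySetD (h.getD i []) t.1 "1")).length := by
        simpa using hi
      rw [ih _ i hlen]
      have hget : (h.set i (PySem.List.pySetD (h.getD i []) t.1 "1")).getD i [] =
          PySem.List.pySetD (h.getD i []) t.1 "1" := by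
        simp [List.getD_eq_getElem?_getD, hi]
      rw [hget, List.set_set]
    · rw [if_neg hm, if_neg hm, ih _ i hi]

theorem pvAStep_length (sg : List (List Int)) (pm : List (Int × Int × Int × Int)) (i : Nat) :
    ∀ (h : List (List String)),
    (pm.foldl (fun h t => if t.2.2.2 ∈ sg.getD i [] then h.set i (PySem.List.pySetD (h.getD i []) t.1 "1") else h) h).length = h.length := by
  induction pm with
  | nil => intro h; rfl
  | cons t rest ih =>
    intro h
    simp only [List.foldl_cons]
    by_cases hm : t.2.2.2 ∈ sg.getD i []
    · rw [if_pos hm, ih, List.length_set]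
    · rw [if_neg hm, ih]

theorem pvAFold_length (sg : List (List Int)) (pm : List (Int × Int × Int × Int)) :
    ∀ (l : List Nat) (h : List (List String)),
    ((l.foldl (fun h i => pm.foldl (fun h t => if t.2.2.2 ∈ sg.getD i [] then h.set i (PySem.List.pySetD (h.getD i []) t.1 "1") else h) h) h).length) = h.length := by
  intro l
  induction l with
  | nil => intro h; rfl
  | cons a as ih =>
    intro h
    simp only [List.foldl_cons]
    rw [ih, pvAStep_length]

-- A's outer loop over genome indices, characterised per row index
theorem pvAOuter (sg : List (List Int)) (pm : List (Int × Int × Int × Int)) :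
    ∀ (k : Nat) (h : List (List String)), k ≤ h.length → ∀ (j : Nat),
    ((List.range k).foldl
      (fun h i => pm.foldl (fun h t => if t.2.2.2 ∈ sg.getD i [] then h.set i (PySem.List.pySetD (h.getD i []) t.1 "1") else h) h)
      h)[j]? =
      if j < k then some (pm.foldl (fun row t => if t.2.2.2 ∈ sg.getD j [] then PySem.List.pySetD row t.1 "1" else row) (h.getD j []))
      else h[j]? := by
  intro k
  induction k with
  | zero => intro h _ j; simp
  | succ k ih =>
    intro h hk j
    have hk' : k ≤ h.length := by omega
    rw [List.range_succ, List.foldl_append, List.foldl_cons, List.foldl_nil]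
    set P := (List.range k).foldl
      (fun h i => pm.foldl (fun h t => if t.2.2.2 ∈ sg.getD i [] then h.set i (PySem.List.pySetD (h.getD i []) t.1 "1") else h) h)
      h with hP
    have hPlen : P.length = h.length := by
      rw [hP]; exact pvAFold_length sg pm (List.range k) h
    have hkP : k < P.length := by omega
    have hPk : P.getD k [] = h.getD k [] := by
      have h2 := ih h hk' k
      simp only [lt_irrefl, if_false] at h2
      rw [← hP] at h2
      simp [List.getD_eq_getElem?_getD, h2]
    rw [pvInnerA _ _ P k hkP, hPk]
    by_cases hjk : j = k
    · subst hjk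
      rw [List.getElem?_set]
      simp [hkP]
    · rw [List.getElem?_set, if_neg (by omega : ¬ k = j), ih h hk' j]
      by_cases hjlt : j < k
      · rw [if_pos hjlt, if_pos (by omega : j < k + 1)]
      · rw [if_neg hjlt, if_neg (by omega : ¬ j < k + 1)]

-- the index dict's lists are exactly the positions of the matching mutations, in order
theorem pvIndex_getD (pm : List (Int × Int × Int × Int)) (m : Int) :
    ((pm.foldl (fun d t => d.modify t.2.2.2 [] (fun v => v ++ [t.1])) PySem.Dict.empty).getD m []) =
      (pm.filter (fun t => t.2.2.2 == m)).map (fun t => t.1) := by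
  have h1 : (pm.foldl (fun d t => d.modify t.2.2.2 [] (fun v => v ++ [t.1])) PySem.Dict.empty) =
      ((pm.map (fun t => (t.2.2.2, t.1))).foldl (fun d p => d.modify p.1 [] (fun v => v ++ [p.2])) PySem.Dict.empty) := by
    rw [List.foldl_map]
  rw [h1, PySem.Dict.getD_foldl_modify_append, List.filter_map, List.map_map]
  simp [Function.comp_def]

-- the two marking conditions agree at every position
theorem pvCondEq (pm : List (Int × Int × Int × Int)) (g : List Int) (n : Nat) (j : Nat) :
    (pm.any (fun t => decide (t.2.2.2 ∈ g) && pvHit n t.1 j)) =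
      (g.any (fun m => (((pm.foldl (fun d t => d.modify t.2.2.2 [] (fun v => v ++ [t.1])) PySem.Dict.empty).getD m [])).any (fun i => pvHit n i j))) := by
  rw [Bool.eq_iff_iff]
  simp only [List.any_eq_true, pvIndex_getD, List.mem_map, List.mem_filter, Bool.and_eq_true,
    decide_eq_true_eq, beq_iff_eq]
  constructor
  · rintro ⟨t, ht, hmem, hhit⟩
    exact ⟨t.2.2.2, hmem, t.1, ⟨t, ⟨ht, rfl⟩, rfl⟩, hhit⟩
  · rintro ⟨m, hm, i, ⟨t, ⟨ht, hkey⟩, hfst⟩, hhit⟩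
    exact ⟨t, ht, by rw [hkey]; exact hm, by rw [hfst]; exact hhit⟩

-- the two per-row results are equal
theorem pvRowEq (pm : List (Int × Int × Int × Int)) (g : List Int) :
    (pm.foldl (fun row t => if t.2.2.2 ∈ g then PySem.List.pySetD row t.1 "1" else row) (List.replicate pm.length "0")) =
      (g.foldl
        (fun row m => (((pm.foldl (fun d t => d.modify t.2.2.2 [] (fun v => v ++ [t.1])) PySem.Dict.empty).getD m [])).foldl
          (fun row locI => PySem.List.pySetD row locI "1") row)
        (List.replicate pm.length "0")) := by
  apply List.ext_getElem?
  intro j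
  rw [pvRowA_getElem?, pvRowB_getElem?, List.length_replicate, pvCondEq]

theorem make_haps_spec : Claim_equal_make_haps := by
  intro pm sg _ _
  unfold Spec_make_haps make_haps make_haps_alt
  simp only []
  have hinit : (List.range sg.length).foldl (fun h _ => h ++ [List.replicate pm.length "0"]) ([] : List (List String)) =
      List.replicate sg.length (List.replicate pm.length "0") := by
    rw [PySem.List.foldl_append_singleton_eq_map (fun _ => List.replicate pm.length "0")]
    simp [List.map_const']
  rw [hinit]
  apply List.ext_getElem?
  intro j
  rw [pvAOuter sg pm sg.length _ (by simp), List.getElem?_map]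
  by_cases hj : j < sg.length
  · rw [if_pos hj, List.getElem?_eq_getElem hj, Option.map_some]
    have hrep : (List.replicate sg.length (List.replicate pm.length "0")).getD j [] = List.replicate pm.length "0" := by
      simp [List.getD_eq_getElem?_getD, hj]
    have hg : sg.getD j [] = sg[j] := by
      simp [List.getD_eq_getElem?_getD, List.getElem?_eq_getElem hj]
    rw [hrep, hg, pvRowEq pm sg[j]]
  · rw [if_neg hj, List.getElem?_eq_none (by simpa using hj), List.getElem?_eq_none (by omega), Option.map_none]
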